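-- pv_equiv track=rewrite | github.com/avichaigel/Real-Time-Prediction | Tests/ex2neat.py | create_feature_list
-- ===== SOURCE A (Python) =====
-- def create_feature_list(row):
--     features, feat_a, feat_b, feat_c, feat_d = [], [], [], [], []
--     length = len(row)
--     for i in range(0, length, 4):
--         feat_a.append(row[i])
--         feat_b.append(row[i + 1])
--         feat_c.append(row[i + 2])
--         feat_d.append(row[i + 3])
--     features.append(feat_a)
--     features.append(feat_b)
--     features.append(feat_c)
--     features.append(feat_d)
--     return features
-- ===== SOURCE B (Python) =====
-- def create_feature_list(row):
--     it = iter(row)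
--     columns = [[], [], [], []]
--     for quad in zip(it, it, it, it, strict=True):
--         for col, val in zip(columns, quad):
--             col.append(val)
--     return columns
-- ===== Notes on version B (the rewrite author's own statement) =====
-- stated objective: idiomatic
-- what changed: Replaces the stride-4 index loop reading row[i..i+3] into four named accumulators with the standard-library grouper idiom: one iterator zipped with itself four times (strict, so uneven lengths still raise) yields the quadruples, and each quadruple is distributed over the column table by zip.
import Mathlib
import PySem

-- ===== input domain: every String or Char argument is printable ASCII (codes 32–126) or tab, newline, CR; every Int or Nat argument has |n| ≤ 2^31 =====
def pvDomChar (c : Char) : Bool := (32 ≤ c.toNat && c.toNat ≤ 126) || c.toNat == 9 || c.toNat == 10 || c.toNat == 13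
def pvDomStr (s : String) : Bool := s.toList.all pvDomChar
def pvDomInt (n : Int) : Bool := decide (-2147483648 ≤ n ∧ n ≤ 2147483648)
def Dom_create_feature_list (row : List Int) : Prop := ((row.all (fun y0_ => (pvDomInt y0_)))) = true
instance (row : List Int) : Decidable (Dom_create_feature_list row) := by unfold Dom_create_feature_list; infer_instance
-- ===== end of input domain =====

-- B replaces A's stride-4 index loop over four named accumulators with the grouper idiom:
-- one iterator zipped with itself four times yields the quadruples, each distributed over a
-- column table by zip; both raise on lengths not a multiple of 4 (excluded by Pre_).


-- ===== PORT A =====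
-- where Python would raise IndexError (row[i+j] out of range) the port reads default 0;
-- those inputs are excluded by Pre_create_feature_list.
def create_feature_list (row : List Int) : List (List Int) :=
  let length : Int := (row.length : Int)
  let st := (PySem.List.pyRange 0 length 4).foldl
    (fun (st : List Int × List Int × List Int × List Int) i =>
      (st.1 ++ [PySem.List.pyGetD row (i + 0) 0],
       st.2.1 ++ [PySem.List.pyGetD row (i + 1) 0],
       st.2.2.1 ++ [PySem.List.pyGetD row (i + 2) 0],
       st.2.2.2 ++ [PySem.List.pyGetD row (i + 3) 0])) ([], [], [], [])
  [st.1, st.2.1, st.2.2.1, st.2.2.2]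

-- ===== PORT B =====
-- 'zip(it, it, it, it, strict=True)' over a single iterator = successive quadruples of the
-- list; on a leftover (length not a multiple of 4, excluded by Pre_) Python raises ValueError
-- and the port drops the leftover.
def quadsB : List Int → List (Int × Int × Int × Int)
  | a :: b :: c :: d :: r => (a, b, c, d) :: quadsB r
  | _ => []

-- 'for col, val in zip(columns, quad): col.append(val)'
def create_feature_list_alt (row : List Int) : List (List Int) :=
  (quadsB row).foldl
    (fun (columns : List (List Int)) q =>
      (columns.zip [q.1, q.2.1, q.2.2.1, q.2.2.2]).map (fun cv => cv.1 ++ [cv.2]))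
    [[], [], [], []]

-- ===== PRECONDITION & SPEC =====
-- Pre_ excludes exactly the rows whose length is not a multiple of 4, on which A raises IndexError.
def Pre_create_feature_list (row : List Int) : Prop := row.length % 4 = 0
instance (row : List Int) : Decidable (Pre_create_feature_list row) := by unfold Pre_create_feature_list; infer_instance
def pvWitness_create_feature_list : List Int := [1, 2, 3, 4, 5, 6, 7, 8]

def Spec_create_feature_list (row : List Int) (out : List (List Int)) : Prop := out = create_feature_list_alt row
instance (row : List Int) (out : List (List Int)) : Decidable (Spec_create_feature_list row out) := by unfold Spec_create_feature_list; infer_instance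

-- ===== CLAIM =====
def Claim_equal_create_feature_list : Prop := ∀ (row : List Int), Dom_create_feature_list row → Pre_create_feature_list row → Spec_create_feature_list row (create_feature_list row)

-- ===== LEMMAS AND PROOFS =====

/-- Reference: the k-strided column of `row` (k-th element of every 4-chunk). -/
def selCol (row : List Int) (k : Nat) : List Int :=
  (List.range (row.length / 4)).map (fun j => row.getD (4 * j + k) 0)

theorem getD_cons4 (x y z w : Int) (l : List Int) (n : Nat) :
    List.getD (x :: y :: z :: w :: l) (n + 4) 0 = List.getD l n 0 := by
  show List.getD (x :: y :: z :: w :: l) (n + 1 + 1 + 1 + 1) 0 = _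
  simp

theorem selCol_cons (a b c d : Int) (r : List Int) (k : Nat) :
    selCol (a :: b :: c :: d :: r) k = List.getD (a :: b :: c :: d :: r) k 0 :: selCol r k := by
  unfold selCol
  have hl : (a :: b :: c :: d :: r).length / 4 = r.length / 4 + 1 := by
    simp only [List.length_cons]; omega
  rw [hl, List.range_succ_eq_map, List.map_cons, List.map_map]
  refine congrArg₂ _ (by norm_num) ?_
  refine List.map_congr_left (fun j _ => ?_)
  show List.getD (a :: b :: c :: d :: r) (4 * (j + 1) + k) 0 = _
  rw [show 4 * (j + 1) + k = (4 * j + k) + 4 by omega, getD_cons4]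

-- ----- A-side characterisation -----

theorem cfl_foldl_state (L : List Int) (row : List Int) (a b c d : List Int) :
    (L.foldl (fun (st : List Int × List Int × List Int × List Int) i =>
      (st.1 ++ [PySem.List.pyGetD row (i + 0) 0],
       st.2.1 ++ [PySem.List.pyGetD row (i + 1) 0],
       st.2.2.1 ++ [PySem.List.pyGetD row (i + 2) 0],
       st.2.2.2 ++ [PySem.List.pyGetD row (i + 3) 0])) (a, b, c, d)) =
    (a ++ L.map (fun i => PySem.List.pyGetD row (i + 0) 0),
     b ++ L.map (fun i => PySem.List.pyGetD row (i + 1) 0),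
     c ++ L.map (fun i => PySem.List.pyGetD row (i + 2) 0),
     d ++ L.map (fun i => PySem.List.pyGetD row (i + 3) 0)) := by
  induction L generalizing a b c d with
  | nil => simp
  | cons x xs ih =>
    simp only [List.foldl_cons, List.map_cons, ih, List.append_assoc, List.cons_append,
      List.nil_append]

theorem map_pyRange4_eq_selCol (row : List Int) (c : Int) (hc : 0 ≤ c)
    (h : row.length % 4 = 0) :
    (PySem.List.pyRange 0 (row.length : Int) 4).map
      (fun i => PySem.List.pyGetD row (i + c) 0) = selCol row c.toNat := by
  rw [PySem.List.pyRange_of_pos 0 (row.length : Int) (by norm_num), List.map_map]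
  unfold selCol
  have hcount : (if (0 : Int) < (row.length : Int)
      then (((row.length : Int) - 0 + 4 - 1) / 4).toNat else 0) = row.length / 4 := by
    split_ifs with hpos <;> omega
  rw [hcount]
  refine List.map_congr_left (fun j _ => ?_)
  show PySem.List.pyGetD row ((0 : Int) + 4 * (j : Int) + c) 0 = row.getD (4 * j + c.toNat) 0
  have : ((0 : Int) + 4 * (j : Int) + c) = ((4 * j + c.toNat : Nat) : Int) := by
    push_cast [Int.toNat_of_nonneg hc]; ring
  rw [this, PySem.List.pyGetD_natCast]

theorem A_char (row : List Int) (h : row.length % 4 = 0) :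
    create_feature_list row = [selCol row 0, selCol row 1, selCol row 2, selCol row 3] := by
  show ([((PySem.List.pyRange 0 ((row.length : Int)) 4).foldl _ ([], [], [], [])).1, _, _, _] :
    List (List Int)) = _
  rw [cfl_foldl_state]
  simp only [List.nil_append]
  rw [map_pyRange4_eq_selCol row 0 (by norm_num) h,
      map_pyRange4_eq_selCol row 1 (by norm_num) h,
      map_pyRange4_eq_selCol row 2 (by norm_num) h,
      map_pyRange4_eq_selCol row 3 (by norm_num) h]
  rfl

-- ----- B-side characterisation -----

/-- B's fold step: distribute a quadruple over the column table. -/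
def bStep (columns : List (List Int)) (q : Int × Int × Int × Int) : List (List Int) :=
  (columns.zip [q.1, q.2.1, q.2.2.1, q.2.2.2]).map (fun cv => cv.1 ++ [cv.2])

theorem alt_eq_bStep_fold (row : List Int) :
    create_feature_list_alt row = (quadsB row).foldl bStep [[], [], [], []] := rfl

theorem B_char_aux : ∀ (n : Nat) (row : List Int) (a b c d : List Int),
    row.length = n → n % 4 = 0 →
    (quadsB row).foldl bStep [a, b, c, d]
      = [a ++ selCol row 0, b ++ selCol row 1, c ++ selCol row 2, d ++ selCol row 3] := by
  intro n
  induction n using Nat.strong_induction_on with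
  | _ n ih =>
    intro row a b c d hlen h4
    match row with
    | [] =>
      simp only [List.length_nil] at hlen
      subst hlen
      simp [quadsB, selCol]
    | [x] | [x, y] | [x, y, z] => simp at hlen; omega
    | x :: y :: z :: w :: r =>
      have hr : r.length = n - 4 := by simp at hlen; omega
      have hn4 : 4 ≤ n := by simp at hlen; omega
      show ((x, y, z, w) :: quadsB r).foldl bStep [a, b, c, d] = _
      rw [List.foldl_cons,
          show bStep [a, b, c, d] (x, y, z, w) = [a ++ [x], b ++ [y], c ++ [z], d ++ [w]] from rfl,
          ih (n - 4) (by omega) r _ _ _ _ hr (by omega),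
          selCol_cons, selCol_cons, selCol_cons, selCol_cons]
      simp

theorem B_char (row : List Int) (h : row.length % 4 = 0) :
    create_feature_list_alt row = [selCol row 0, selCol row 1, selCol row 2, selCol row 3] := by
  rw [alt_eq_bStep_fold, B_char_aux row.length row [] [] [] [] rfl h]
  simp

-- ===== VERDICT =====
theorem create_feature_list_spec : Claim_equal_create_feature_list := by
  intro row _ hpre
  show create_feature_list row = create_feature_list_alt row
  rw [A_char row hpre, B_char row hpre]
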